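-- pv_equiv track=rewrite | github.com/MrAllatta/migration-workbench | connectors/spreadsheet.py | _apply_fold_into_notes
-- ===== SOURCE A (Python) =====
-- def _normalize_text(value):
--     if value is None:
--         return ""
--     return " ".join(str(value).strip().split()).casefold()
--
-- def _apply_fold_into_notes(projected_rows, folds, source_rows):
--     """Append labeled snippets from source columns into a target column (e.g. Notes).
--
--     folds: list of dicts with keys ``into`` (output header), ``from`` (source header),
--     optional ``prefix`` (e.g. ``Variety`` -> ``Variety: value``).
--     """
--     if not folds or len(projected_rows) < 2:
--         return projected_rows
--     projected_header = projected_rows[0]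
--     p_idx = {_normalize_text(h): i for i, h in enumerate(projected_header)}
--     source_header = source_rows[0] if source_rows else []
--     s_idx = {_normalize_text(h): i for i, h in enumerate(source_header)}
--
--     for row_i in range(1, len(projected_rows)):
--         prow = projected_rows[row_i]
--         srow = source_rows[row_i] if row_i < len(source_rows) else []
--         for fold in folds:
--             into = fold.get("into", "Notes")
--             frm = fold.get("from")
--             prefix = (fold.get("prefix") or "").strip()
--             if not frm:
--                 continue
--             si = s_idx.get(_normalize_text(frm))
--             ti = p_idx.get(_normalize_text(into))
--             if ti is None:
--                 continue
--             raw = ""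
--             if si is not None and si < len(srow):
--                 raw = srow[si]
--             chunk = str(raw).strip() if raw is not None else ""
--             if not chunk:
--                 continue
--             label = f"{prefix}: {chunk}" if prefix else chunk
--             prev = str(prow[ti]).strip() if ti < len(prow) else ""
--             while len(prow) <= ti:
--                 prow.append("")
--             prow[ti] = f"{prev}\n{label}".strip() if prev else label
--     return projected_rows
-- ===== SOURCE B (Python) =====
-- def _normalize_text(value):
--     if value is None:
--         return ""
--     return " ".join(str(value).strip().split()).casefold()
--
-- def _apply_fold_into_notes(projected_rows, folds, source_rows):
--     # Returns a fresh result (does not mutate projected_rows); return value equals A's.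
--     if not folds or len(projected_rows) < 2:
--         return projected_rows
--     header = projected_rows[0]
--     p_idx = {_normalize_text(h): i for i, h in enumerate(header)}
--     s_head = source_rows[0] if source_rows else []
--     s_idx = {_normalize_text(h): i for i, h in enumerate(s_head)}
--     out = [header]
--     for r in range(1, len(projected_rows)):
--         prow = projected_rows[r]
--         srow = source_rows[r] if r < len(source_rows) else []
--         # phase 1: gather the labels each target column receives, grouped by column
--         labels = {}
--         for fold in folds:
--             frm = fold.get("from")
--             if not frm:
--                 continue
--             ti = p_idx.get(_normalize_text(fold.get("into", "Notes")))
--             if ti is None: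
--                 continue
--             si = s_idx.get(_normalize_text(frm))
--             raw = srow[si] if si is not None and si < len(srow) else ""
--             chunk = str(raw).strip() if raw is not None else ""
--             if not chunk:
--                 continue
--             prefix = (fold.get("prefix") or "").strip()
--             labels.setdefault(ti, []).append(f"{prefix}: {chunk}" if prefix else chunk)
--         # phase 2: build each output cell directly with one join
--         width = max([len(prow)] + [ti + 1 for ti in labels])
--         row = []
--         for j in range(width):
--             base = prow[j] if j < len(prow) else ""
--             if j in labels:
--                 prev = str(base).strip()
--                 row.append("\n".join(([prev] if prev else []) + labels[j]))
--             else: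
--                 row.append(base)
--         out.append(row)
--     return out
-- ===== Notes on version B (the rewrite author's own statement) =====
-- stated objective: alternative
-- what changed: Per row, B first groups the fired snippets by target column into a labels dict and then constructs every output cell directly with a single "\n".join over [stripped base]+labels, instead of A's fold-major loop that repeatedly pads the row in place and re-reads, re-strips and rewrites the target cell once per fold (return values are equal; B does not mutate its argument).
import Mathlib
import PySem

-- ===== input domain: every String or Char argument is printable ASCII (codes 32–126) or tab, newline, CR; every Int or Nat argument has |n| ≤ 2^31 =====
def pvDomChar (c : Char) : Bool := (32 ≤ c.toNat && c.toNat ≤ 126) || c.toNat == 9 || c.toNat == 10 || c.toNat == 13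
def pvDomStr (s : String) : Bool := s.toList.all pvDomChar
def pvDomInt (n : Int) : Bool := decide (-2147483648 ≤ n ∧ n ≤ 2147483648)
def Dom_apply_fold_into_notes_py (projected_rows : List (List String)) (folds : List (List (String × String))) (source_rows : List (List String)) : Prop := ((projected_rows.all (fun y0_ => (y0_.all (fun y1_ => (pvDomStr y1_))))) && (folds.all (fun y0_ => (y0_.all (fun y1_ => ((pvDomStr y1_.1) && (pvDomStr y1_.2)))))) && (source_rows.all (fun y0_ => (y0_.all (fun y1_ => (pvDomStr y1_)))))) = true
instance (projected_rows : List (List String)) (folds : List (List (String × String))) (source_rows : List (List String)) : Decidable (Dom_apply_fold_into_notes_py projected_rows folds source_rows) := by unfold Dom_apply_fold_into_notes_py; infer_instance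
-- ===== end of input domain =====

-- B groups, per row, the fired snippets by target column and then builds every output cell
-- with a single "\n"-join, instead of A's fold-major in-place pad/re-strip/rewrite loop
-- (objective: alternative); equivalence is about the RETURN value only — Python A mutates
-- projected_rows in place, B builds a fresh list.

-- shared helpers (both Pythons contain these verbatim constructs):
-- _normalize_text(value) on a string: " ".join(str(value).strip().split()).casefold()
-- (casefold = lower on the ASCII domain)
def pvNorm (s : String) : String :=
  PySem.Str.lower (PySem.Str.join " " (PySem.Str.split₀ (PySem.Str.strip s)))

-- fold.get(k): first match in the association list (Python dicts have unique keys)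
def pvFoldGet (fold : List (String × String)) (k : String) : Option String :=
  (fold.find? (fun p => p.1 == k)).map (·.2)

-- {_normalize_text(h): i for i, h in enumerate(header)}  (later duplicates overwrite)
def pvIdx (header : List String) : PySem.Dict String Int :=
  (PySem.List.enumerate header).foldl (fun d p => d.insert (pvNorm p.2) p.1) PySem.Dict.empty

-- ===== PORT A =====
-- while len(prow) <= ti: prow.append("")  (the loop appends exactly (ti+1-len)⁺ cells)
def pvPadAGo : Nat → List String → List String
  | 0, row => row
  | n + 1, row => pvPadAGo n (row ++ [""])

def pvPadA (row : List String) (ti : Int) : List String :=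
  pvPadAGo (ti + 1 - row.length).toNat row

-- one iteration of A's inner `for fold in folds` body on the mutable prow
def pvStepA (p_idx s_idx : PySem.Dict String Int) (srow : List String)
    (prow : List String) (fold : List (String × String)) : List String :=
  let into := (pvFoldGet fold "into").getD "Notes"
  let frm := (pvFoldGet fold "from").getD ""      -- `if not frm` ≡ test against ""
  let pfx := PySem.Str.strip ((pvFoldGet fold "prefix").getD "")  -- (… or "").strip()
  if frm = "" then prow
  else
    let si? := s_idx.get? (pvNorm frm)
    match p_idx.get? (pvNorm into) with
    | none => prow
    | some ti =>
      let raw := match si? with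
        | some si => if si < (srow.length : Int) then PySem.List.pyGetD srow si "" else ""
        | none => ""
      let chunk := PySem.Str.strip raw
      if chunk = "" then prow
      else
        let label := if pfx ≠ "" then pfx ++ ": " ++ chunk else chunk
        let prev := if ti < (prow.length : Int) then PySem.Str.strip (PySem.List.pyGetD prow ti "") else ""
        (pvPadA prow ti).set ti.toNat
          (if prev ≠ "" then PySem.Str.strip (prev ++ "\n" ++ label) else label)

def apply_fold_into_notes_py (projected_rows : List (List String)) (folds : List (List (String × String))) (source_rows : List (List String)) : List (List String) :=
  if folds = [] ∨ projected_rows.length < 2 then projected_rows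
  else
    let p_idx := pvIdx (projected_rows.headD [])
    let s_idx := pvIdx (if source_rows ≠ [] then source_rows.headD [] else [])
    -- for row_i in range(1, len(projected_rows)): mutate projected_rows[row_i] in place
    (PySem.List.pyRange 1 projected_rows.length 1).foldl
      (fun s row_i =>
        let prow := PySem.List.pyGetD s row_i []
        let srow := if row_i < (source_rows.length : Int)
                    then PySem.List.pyGetD source_rows row_i [] else []
        s.set row_i.toNat (folds.foldl (pvStepA p_idx s_idx srow) prow))
      projected_rows

-- ===== PORT B =====
-- phase 1 loop body: labels.setdefault(ti, []).append(label)  =  modify ti [] (· ++ [label])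
def pvLabelStep (p_idx s_idx : PySem.Dict String Int) (srow : List String)
    (d : PySem.Dict Int (List String)) (fold : List (String × String)) :
    PySem.Dict Int (List String) :=
  let frm := (pvFoldGet fold "from").getD ""
  if frm = "" then d
  else
    match p_idx.get? (pvNorm ((pvFoldGet fold "into").getD "Notes")) with
    | none => d
    | some ti =>
      let raw := match s_idx.get? (pvNorm frm) with
        | some si => if si < (srow.length : Int) then PySem.List.pyGetD srow si "" else ""
        | none => ""
      let chunk := PySem.Str.strip raw
      if chunk = "" then d
      else
        let pfx := PySem.Str.strip ((pvFoldGet fold "prefix").getD "")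
        d.modify ti [] (· ++ [if pfx ≠ "" then pfx ++ ": " ++ chunk else chunk])

-- width = max([len(prow)] + [ti + 1 for ti in labels])
def pvWidth (prow : List String) (d : PySem.Dict Int (List String)) : Int :=
  (d.keys.map (· + 1)).foldl max (prow.length : Int)

-- phase 2 body: one output cell
def pvCellB (prow : List String) (d : PySem.Dict Int (List String)) (j : Int) : String :=
  let base := if j < (prow.length : Int) then PySem.List.pyGetD prow j "" else ""
  if d.contains j then
    let prev := PySem.Str.strip base
    PySem.Str.join "\n" ((if prev = "" then [] else [prev]) ++ d.getD j [])
  else base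

def pvRowB (p_idx s_idx : PySem.Dict String Int) (srow prow : List String)
    (folds : List (List (String × String))) : List String :=
  let d := folds.foldl (pvLabelStep p_idx s_idx srow) PySem.Dict.empty
  (PySem.List.pyRange 0 (pvWidth prow d) 1).map (pvCellB prow d)

def apply_fold_into_notes_py_alt (projected_rows : List (List String)) (folds : List (List (String × String))) (source_rows : List (List String)) : List (List String) :=
  if folds = [] ∨ projected_rows.length < 2 then projected_rows
  else
    let p_idx := pvIdx (projected_rows.headD [])
    let s_idx := pvIdx (if source_rows ≠ [] then source_rows.headD [] else [])
    projected_rows.headD [] ::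
      (PySem.List.enumerate projected_rows.tail 1).map (fun p =>
        let srow := if p.1 < (source_rows.length : Int)
                    then PySem.List.pyGetD source_rows p.1 [] else []
        pvRowB p_idx s_idx srow p.2 folds)

-- ===== PRECONDITION & SPEC =====
def Spec_apply_fold_into_notes_py (projected_rows : List (List String)) (folds : List (List (String × String))) (source_rows : List (List String)) (out : List (List String)) : Prop := out = apply_fold_into_notes_py_alt projected_rows folds source_rows
instance (projected_rows : List (List String)) (folds : List (List (String × String))) (source_rows : List (List String)) (out : List (List String)) : Decidable (Spec_apply_fold_into_notes_py projected_rows folds source_rows out) := by unfold Spec_apply_fold_into_notes_py; infer_instance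

-- ===== CLAIM (what is proved, stated in full; the proofs are below) =====
def Claim_equal_apply_fold_into_notes_py : Prop := ∀ (projected_rows : List (List String)) (folds : List (List (String × String))) (source_rows : List (List String)), Dom_apply_fold_into_notes_py projected_rows folds source_rows → Spec_apply_fold_into_notes_py projected_rows folds source_rows (apply_fold_into_notes_py projected_rows folds source_rows)

-- ===== LEMMAS AND PROOFS =====

-- "stripped and nonempty": the shape of every chunk/prefix/label and of every updated cell
def pvSN (s : String) : Prop := PySem.Str.strip s = s ∧ s ≠ ""

-- ---- string facts: strip keeps a word whose first and last chars are non-space ----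

theorem pv_head?_dropWhile (p : Char → Bool) (l : List Char) :
    ∀ c ∈ (l.dropWhile p).head?, p c = false := by
  induction l with
  | nil => simp
  | cons a t ih =>
      intro c hc
      rw [List.dropWhile_cons] at hc
      by_cases h : p a = true
      · exact ih c (by simpa [h] using hc)
      · simp at h
        simp only [h, Bool.false_eq_true, if_false, List.head?_cons, Option.mem_def,
          Option.some.injEq] at hc
        subst hc; exact h

theorem pv_lstrip_eq_self (x : List Char)
    (h : ∀ c ∈ x.head?, PySem.Chars.isspace c = false) : PySem.Chars.lstrip x = x := by
  cases x with
  | nil => rfl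
  | cons a t =>
      have := h a (by simp)
      simp [PySem.Chars.lstrip, this]

theorem pv_rstrip_eq_self (x : List Char)
    (h : ∀ c ∈ x.getLast?, PySem.Chars.isspace c = false) : PySem.Chars.rstrip x = x := by
  unfold PySem.Chars.rstrip
  have h' : ∀ c ∈ x.reverse.head?, PySem.Chars.isspace c = false := by
    simpa [List.head?_reverse] using h
  have := pv_lstrip_eq_self x.reverse h'
  unfold PySem.Chars.lstrip at this
  rw [this, List.reverse_reverse]

theorem pv_strip_eq_self (x : List Char)
    (hh : ∀ c ∈ x.head?, PySem.Chars.isspace c = false)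
    (hl : ∀ c ∈ x.getLast?, PySem.Chars.isspace c = false) : PySem.Chars.strip x = x := by
  unfold PySem.Chars.strip
  rw [pv_lstrip_eq_self x hh, pv_rstrip_eq_self x hl]

theorem pv_getLast?_strip (x : List Char) :
    ∀ c ∈ (PySem.Chars.strip x).getLast?, PySem.Chars.isspace c = false := by
  intro c hc
  have he : (PySem.Chars.strip x).getLast? =
      ((PySem.Chars.lstrip x).reverse.dropWhile PySem.Chars.isspace).head? := by
    unfold PySem.Chars.strip PySem.Chars.rstrip
    rw [← List.head?_reverse, List.reverse_reverse]
  rw [he] at hc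
  exact pv_head?_dropWhile _ _ c hc

theorem pv_head?_strip (x : List Char) :
    ∀ c ∈ (PySem.Chars.strip x).head?, PySem.Chars.isspace c = false := by
  intro c hc
  have hpre : PySem.Chars.strip x <+: PySem.Chars.lstrip x := by
    unfold PySem.Chars.strip PySem.Chars.rstrip
    have h0 := List.dropWhile_suffix (l := (PySem.Chars.lstrip x).reverse) PySem.Chars.isspace
    have h1 := List.reverse_prefix.mpr h0
    simpa using h1
  obtain ⟨t, ht⟩ := hpre
  cases hs : PySem.Chars.strip x with
  | nil => simp [hs] at hc
  | cons a u =>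
      rw [hs] at ht hc
      simp only [List.head?_cons, Option.mem_def, Option.some.injEq] at hc
      subst hc
      apply pv_head?_dropWhile PySem.Chars.isspace x a
      unfold PySem.Chars.lstrip at ht
      rw [← ht]
      simp

theorem pv_toList_ne_nil {s : String} (h : s ≠ "") : s.toList ≠ [] := by
  intro hn
  exact h (String.toList_inj.mp (by simpa using hn))

theorem pv_SN_chars {s : String} (h : pvSN s) :
    PySem.Chars.strip s.toList = s.toList ∧ s.toList ≠ [] := by
  constructor
  · have := congrArg String.toList h.1
    simpa [PySem.Str.toList_strip] using this
  · exact pv_toList_ne_nil h.2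

theorem pv_SN_strip (s : String) (h : PySem.Str.strip s ≠ "") : pvSN (PySem.Str.strip s) := by
  refine ⟨?_, h⟩
  apply String.toList_inj.mp
  simp only [PySem.Str.toList_strip]
  exact pv_strip_eq_self _ (pv_head?_strip _) (pv_getLast?_strip _)

-- strip keeps a concatenation whose two ends are stripped nonempty words (the middle is interior)
theorem pv_strip_append (a m b : String) (ha : pvSN a) (hb : pvSN b) :
    PySem.Str.strip (a ++ m ++ b) = a ++ m ++ b := by
  obtain ⟨ha1, ha2⟩ := pv_SN_chars ha
  obtain ⟨hb1, hb2⟩ := pv_SN_chars hb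
  apply String.toList_inj.mp
  simp only [PySem.Str.toList_strip, String.toList_append]
  apply pv_strip_eq_self
  · intro c hc
    obtain ⟨a0, at0, hae⟩ : ∃ a0 at0, a.toList = a0 :: at0 := by
      cases h : a.toList with
      | nil => exact absurd h ha2
      | cons a0 at0 => exact ⟨a0, at0, rfl⟩
    rw [hae] at hc
    simp only [List.cons_append, List.head?_cons, Option.mem_def, Option.some.injEq] at hc
    subst hc
    exact pv_head?_strip a.toList a0 (by rw [ha1, hae]; simp)
  · intro c hc
    rw [List.getLast?_append_of_ne_nil _ hb2] at hc
    exact pv_getLast?_strip b.toList c (by rw [hb1]; exact hc)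

theorem pv_SN_append (a m b : String) (ha : pvSN a) (hb : pvSN b) : pvSN (a ++ m ++ b) := by
  refine ⟨pv_strip_append a m b ha hb, ?_⟩
  intro h
  have h2 := congrArg String.toList h
  simp only [String.toList_append] at h2
  have h3 : a = "" ∧ m = "" ∧ b = "" := by
    have := congrArg List.length h2
    simpa [List.length_append] using this
  exact hb.2 h3.2.2

-- ---- join facts ----

theorem pv_join_cons_cons (sep a b : String) (rest : List String) :
    PySem.Str.join sep (a :: b :: rest) = a ++ sep ++ PySem.Str.join sep (b :: rest) := by
  apply String.toList_inj.mp
  simp [PySem.Str.join, PySem.Chars.join, List.intercalate]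

theorem pv_join_singleton (sep a : String) : PySem.Str.join sep [a] = a := by
  apply String.toList_inj.mp
  simp [PySem.Str.join, PySem.Chars.join, List.intercalate]

theorem pv_join_append_last (sep x : String) (l : List String) (h : l ≠ []) :
    PySem.Str.join sep (l ++ [x]) = PySem.Str.join sep l ++ sep ++ x := by
  induction l with
  | nil => exact absurd rfl h
  | cons a t ih =>
      cases t with
      | nil => simp [pv_join_cons_cons, pv_join_singleton]
      | cons b r =>
          have hstep : (a :: b :: r) ++ [x] = a :: b :: (r ++ [x]) := by simp
          rw [hstep, pv_join_cons_cons, pv_join_cons_cons]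
          have h2 : b :: (r ++ [x]) = (b :: r) ++ [x] := by simp
          rw [h2, ih (by simp)]
          simp [String.append_assoc]

theorem pv_SN_join (ls : List String) (h : ls ≠ []) (hall : ∀ l ∈ ls, pvSN l) :
    pvSN (PySem.Str.join "\n" ls) := by
  induction ls with
  | nil => exact absurd rfl h
  | cons a t ih =>
      cases t with
      | nil => rw [pv_join_singleton]; exact hall a (by simp)
      | cons b r =>
          rw [pv_join_cons_cons]
          exact pv_SN_append _ _ _ (hall a (by simp))
            (ih (by simp) (fun l hl => hall l (by simp [hl])))

-- every label either is a stripped chunk or carries a stripped prefix on its left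
theorem pv_SN_label (pfxsrc raw : String) (h : PySem.Str.strip raw ≠ "") :
    pvSN (if PySem.Str.strip pfxsrc ≠ "" then PySem.Str.strip pfxsrc ++ ": " ++ PySem.Str.strip raw
          else PySem.Str.strip raw) := by
  by_cases hp : PySem.Str.strip pfxsrc = ""
  · simp only [hp, ne_eq, not_true_eq_false, if_false]
    exact pv_SN_strip raw h
  · simp only [ne_eq, hp, not_false_iff, if_true]
    exact pv_SN_append _ _ _ (pv_SN_strip pfxsrc hp) (pv_SN_strip raw h)

-- ---- the two labelled-cell update shapes of A, expressed as B's single join ----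

theorem pv_combine_none (base lab : String) (hlab : pvSN lab) :
    (if PySem.Str.strip base ≠ "" then PySem.Str.strip (PySem.Str.strip base ++ "\n" ++ lab) else lab)
      = PySem.Str.join "\n" ((if PySem.Str.strip base = "" then [] else [PySem.Str.strip base]) ++ [lab]) := by
  by_cases h : PySem.Str.strip base = ""
  · simp [h, pv_join_singleton]
  · have hSN := pv_SN_strip base h
    simp only [ne_eq, h, not_false_iff, if_true, if_false]
    rw [pv_strip_append _ _ _ hSN hlab]
    have h2 : [PySem.Str.strip base] ++ [lab] = [PySem.Str.strip base, lab] := by simp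
    rw [h2, pv_join_cons_cons, pv_join_singleton]

theorem pv_combine_some (base lab : String) (ls : List String) (hls : ls ≠ [])
    (hall : ∀ l ∈ ls, pvSN l) (hlab : pvSN lab) :
    (if PySem.Str.strip (PySem.Str.join "\n" ((if PySem.Str.strip base = "" then [] else [PySem.Str.strip base]) ++ ls)) ≠ ""
      then PySem.Str.strip (PySem.Str.strip (PySem.Str.join "\n" ((if PySem.Str.strip base = "" then [] else [PySem.Str.strip base]) ++ ls)) ++ "\n" ++ lab)
      else lab)
      = PySem.Str.join "\n" ((if PySem.Str.strip base = "" then [] else [PySem.Str.strip base]) ++ (ls ++ [lab])) := by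
  have hLne : (if PySem.Str.strip base = "" then [] else [PySem.Str.strip base]) ++ ls ≠ [] := by
    intro hn; exact hls (List.append_eq_nil_iff.mp hn).2
  have hLall : ∀ l ∈ (if PySem.Str.strip base = "" then [] else [PySem.Str.strip base]) ++ ls, pvSN l := by
    intro l hl
    rcases List.mem_append.mp hl with h1 | h2
    · by_cases hb : PySem.Str.strip base = ""
      · rw [if_pos hb] at h1; simp at h1
      · rw [if_neg hb] at h1
        simp only [List.mem_singleton] at h1
        subst h1; exact pv_SN_strip base hb
    · exact hall l h2
  have hSN := pv_SN_join _ hLne hLall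
  rw [hSN.1]
  simp only [ne_eq, hSN.2, not_false_iff, if_true]
  rw [pv_strip_append _ _ _ hSN hlab, ← pv_join_append_last "\n" lab _ hLne,
    List.append_assoc]

-- ---- A's padding loop ----

theorem pvPadAGo_eq (n : Nat) : ∀ row, pvPadAGo n row = row ++ List.replicate n "" := by
  induction n with
  | zero => intro row; simp [pvPadAGo]
  | succ m ih =>
      intro row
      rw [pvPadAGo, ih, List.append_assoc, List.replicate_succ]
      rfl

theorem pvPadA_eq (row : List String) (ti : Int) :
    pvPadA row ti = row ++ List.replicate (ti + 1 - row.length).toNat "" :=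
  pvPadAGo_eq _ row

-- ---- dict invariant: every bucket is a nonempty list of SN labels at a key ≥ 0 ----

def pvGood (d : PySem.Dict Int (List String)) : Prop :=
  ∀ k : Int, d.contains k = true → 0 ≤ k ∧ d.getD k [] ≠ [] ∧ ∀ l ∈ d.getD k [], pvSN l

theorem pv_good_empty : pvGood PySem.Dict.empty := by
  intro k hk
  simp [PySem.Dict.contains_empty] at hk

theorem pv_good_modify (d : PySem.Dict Int (List String)) (hd : pvGood d) (ti : Int)
    (hti : 0 ≤ ti) (lab : String) (hlab : pvSN lab) :
    pvGood (d.modify ti [] (· ++ [lab])) := by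
  intro k hk
  rw [PySem.Dict.contains_modify] at hk
  rw [PySem.Dict.getD_modify]
  by_cases h : k = ti
  · subst h
    refine ⟨hti, by simp, ?_⟩
    simp only [if_pos rfl]
    intro l hl
    rcases List.mem_append.mp hl with h1 | h2
    · by_cases hc : d.contains k = true
      · exact (hd k hc).2.2 l h1
      · rw [PySem.Dict.getD_of_not_contains _ _ (by simpa using hc)] at h1; simp at h1
    · simp only [List.mem_singleton] at h2; subst h2; exact hlab
  · rw [if_neg h]
    have hc : d.contains k = true := by simpa [beq_iff_eq, h] using hk
    exact hd k hc

-- ---- width bookkeeping ----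

theorem pv_width_ge (prow : List String) (d : PySem.Dict Int (List String)) :
    (prow.length : Int) ≤ pvWidth prow d :=
  (PySem.List.le_foldl_max _ _).1

theorem pv_width_nonneg (prow : List String) (d : PySem.Dict Int (List String)) :
    0 ≤ pvWidth prow d :=
  le_trans (Int.natCast_nonneg _) (pv_width_ge prow d)

theorem pv_width_key (prow : List String) (d : PySem.Dict Int (List String)) (k : Int)
    (h : d.contains k = true) : k + 1 ≤ pvWidth prow d := by
  apply (PySem.List.le_foldl_max (d.keys.map (· + 1)) (prow.length : Int)).2
  exact List.mem_map.mpr ⟨k, (PySem.Dict.contains_iff_mem_keys d k).mp h, rfl⟩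

theorem pv_width_modify (prow : List String) (d : PySem.Dict Int (List String)) (ti : Int)
    (lab : String) :
    pvWidth prow (d.modify ti [] (· ++ [lab])) = max (pvWidth prow d) (ti + 1) := by
  unfold pvWidth
  rw [PySem.Dict.keys_modify]
  by_cases h : d.contains ti = true
  · rw [PySem.Dict.keys_insert_of_contains d _ h]
    have := pv_width_key prow d ti h
    unfold pvWidth at this
    omega
  · rw [PySem.Dict.keys_insert_of_not_contains d _ (by simpa using h), List.map_append,
      List.foldl_append]
    rfl

-- ---- the per-row state of A is B's cell construction for the labels collected so far ----

def pvBuild (prow : List String) (d : PySem.Dict Int (List String)) : List String :=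
  (PySem.List.pyRange 0 (pvWidth prow d) 1).map (pvCellB prow d)

theorem pvBuild_length (prow : List String) (d : PySem.Dict Int (List String)) :
    (pvBuild prow d).length = (pvWidth prow d).toNat := by
  unfold pvBuild
  rw [PySem.List.pyRange_one]
  simp

theorem pvBuild_getElem? (prow : List String) (d : PySem.Dict Int (List String)) (n : Nat) :
    (pvBuild prow d)[n]? =
      if (n : Int) < pvWidth prow d then some (pvCellB prow d n) else none := by
  by_cases h : (n : Int) < pvWidth prow d
  · rw [if_pos h]
    unfold pvBuild
    have hW : pvWidth prow d = ((pvWidth prow d).toNat : Int) :=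
      (Int.toNat_of_nonneg (pv_width_nonneg prow d)).symm
    rw [hW]
    exact PySem.List.getElem?_map_pyRange_zero _ _ n (by omega)
  · rw [if_neg h]
    apply List.getElem?_eq_none
    rw [pvBuild_length]
    omega

theorem pvBuild_pyGetD (prow : List String) (d : PySem.Dict Int (List String)) (i : Int)
    (h0 : 0 ≤ i) (h1 : i < pvWidth prow d) :
    PySem.List.pyGetD (pvBuild prow d) i "" = pvCellB prow d i :=
  PySem.List.pyGetD_map_pyRange_of_nonneg _ _ i "" h0 h1

theorem pvBuild_empty (prow : List String) : pvBuild prow PySem.Dict.empty = prow := by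
  unfold pvBuild pvWidth
  rw [PySem.Dict.keys_empty]
  simp only [List.map_nil, List.foldl_nil]
  conv_rhs => rw [← PySem.List.map_pyGetD_pyRange_zero' prow ""]
  apply List.map_congr_left
  intro j hj
  have hb := PySem.List.mem_pyRange_one.mp hj
  unfold pvCellB
  rw [PySem.Dict.contains_empty]
  simp [hb.2]

-- the crux: A's pad-and-set update of the built row is the build for the updated labels dict
theorem pv_set_build (prow : List String) (d : PySem.Dict Int (List String)) (hd : pvGood d)
    (ti : Int) (hti : 0 ≤ ti) (lab : String) (hlab : pvSN lab) :
    (pvPadA (pvBuild prow d) ti).set ti.toNat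
      (if (if ti < ((pvBuild prow d).length : Int)
            then PySem.Str.strip (PySem.List.pyGetD (pvBuild prow d) ti "") else "") ≠ ""
        then PySem.Str.strip
          ((if ti < ((pvBuild prow d).length : Int)
            then PySem.Str.strip (PySem.List.pyGetD (pvBuild prow d) ti "") else "") ++ "\n" ++ lab)
        else lab)
      = pvBuild prow (d.modify ti [] (· ++ [lab])) := by
  have hW0 := pv_width_nonneg prow d
  have hWp := pv_width_ge prow d
  have hBn := pvBuild_length prow d
  have hlen : ((pvBuild prow d).length : Int) = pvWidth prow d := by rw [hBn]; omega
  have hW' := pv_width_modify prow d ti lab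
  have hcont' : (d.modify ti [] (· ++ [lab])).contains ti = true := by
    rw [PySem.Dict.contains_modify]; simp
  have hgd' : (d.modify ti [] (· ++ [lab])).getD ti [] = d.getD ti [] ++ [lab] := by
    rw [PySem.Dict.getD_modify, if_pos rfl]
  rw [pvPadA_eq]
  apply List.ext_getElem?
  intro n
  rw [List.getElem?_set, pvBuild_getElem?, hW']
  by_cases hn : ti.toNat = n
  · subst hn
    have hset1 : ti.toNat < (pvBuild prow d ++ List.replicate (ti + 1 - ((pvBuild prow d).length : Int)).toNat "").length := by
      rw [List.length_append, List.length_replicate]; omega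
    have hset2 : ((ti.toNat : Nat) : Int) < max (pvWidth prow d) (ti + 1) := by omega
    rw [if_pos rfl, if_pos hset1, if_pos hset2]
    have hcast : ((ti.toNat : Nat) : Int) = ti := Int.toNat_of_nonneg hti
    rw [hcast]
    congr 1
    rw [hlen]
    by_cases hcd : d.contains ti = true
    · -- the column already has labels: cell d ti is a join of SN words
      have htiW : ti < pvWidth prow d := by have := pv_width_key prow d ti hcd; omega
      rw [if_pos htiW, pvBuild_pyGetD prow d ti hti htiW]
      have hcell : pvCellB prow d ti =
          PySem.Str.join "\n"
            ((if PySem.Str.strip (if ti < (prow.length : Int) then PySem.List.pyGetD prow ti "" else "") = ""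
              then [] else [PySem.Str.strip (if ti < (prow.length : Int) then PySem.List.pyGetD prow ti "" else "")])
              ++ d.getD ti []) := by
        unfold pvCellB
        rw [if_pos hcd]
      have hcell' : pvCellB prow (d.modify ti [] (· ++ [lab])) ti =
          PySem.Str.join "\n"
            ((if PySem.Str.strip (if ti < (prow.length : Int) then PySem.List.pyGetD prow ti "" else "") = ""
              then [] else [PySem.Str.strip (if ti < (prow.length : Int) then PySem.List.pyGetD prow ti "" else "")])
              ++ (d.getD ti [] ++ [lab])) := by
        unfold pvCellB
        rw [if_pos hcont', hgd']
      rw [hcell, hcell']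
      exact pv_combine_some _ lab _ (hd ti hcd).2.1 (hd ti hcd).2.2 hlab
    · have hgd : d.getD ti [] = [] := PySem.Dict.getD_of_not_contains _ _ (by simpa using hcd)
      have hcell' : pvCellB prow (d.modify ti [] (· ++ [lab])) ti =
          PySem.Str.join "\n"
            ((if PySem.Str.strip (if ti < (prow.length : Int) then PySem.List.pyGetD prow ti "" else "") = ""
              then [] else [PySem.Str.strip (if ti < (prow.length : Int) then PySem.List.pyGetD prow ti "" else "")])
              ++ [lab]) := by
        unfold pvCellB
        rw [if_pos hcont', hgd', hgd, List.nil_append]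
      rw [hcell']
      by_cases htiW : ti < pvWidth prow d
      · -- fresh column inside the row: cell d ti is the raw base cell
        rw [if_pos htiW, pvBuild_pyGetD prow d ti hti htiW]
        have hcell : pvCellB prow d ti =
            (if ti < (prow.length : Int) then PySem.List.pyGetD prow ti "" else "") := by
          unfold pvCellB
          rw [if_neg hcd]
        rw [hcell]
        exact pv_combine_none _ lab hlab
      · -- fresh column beyond the row: base is "" and prev is ""
        rw [if_neg htiW]
        have hbase : (if ti < ((prow.length : Nat) : Int) then PySem.List.pyGetD prow ti "" else "") = "" :=
          if_neg (by omega)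
        rw [hbase]
        have hstripe : PySem.Str.strip "" = "" := rfl
        rw [hstripe]
        simp [pv_join_singleton]
  · rw [if_neg hn, List.getElem?_append]
    by_cases h1 : n < (pvBuild prow d).length
    · -- untouched column inside the old width: both are the old cell
      rw [if_pos h1, pvBuild_getElem?, if_pos (by omega), if_pos (by omega)]
      congr 1
      have hne : ((n : Nat) : Int) ≠ ti := by intro he; exact hn (by omega)
      unfold pvCellB
      rw [PySem.Dict.contains_modify, PySem.Dict.getD_modify]
      simp [hne]
    · rw [if_neg h1]
      have h1' : pvWidth prow d ≤ (n : Int) := by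
        have h1n : (pvBuild prow d).length ≤ n := Nat.le_of_not_lt h1
        omega
      by_cases h2 : (n : Int) < max (pvWidth prow d) (ti + 1)
      · -- padding region: W ≤ n < ti; B's cell there is "" as well
        rw [if_pos h2]
        have hrep : n - (pvBuild prow d).length < (ti + 1 - ((pvBuild prow d).length : Int)).toNat := by
          omega
        rw [List.getElem?_replicate, if_pos hrep]
        have hcd : d.contains (n : Int) = false := by
          by_contra hcc
          have hcc' : d.contains (n : Int) = true := by simpa using hcc
          have := pv_width_key prow d _ hcc'
          omega
        have hne : ((n : Nat) : Int) ≠ ti := by intro he; exact hn (by omega)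
        have hpge : ¬ ((n : Int) < ((prow.length : Nat) : Int)) := by omega
        have hcell : pvCellB prow (d.modify ti [] (· ++ [lab])) (n : Int) = "" := by
          unfold pvCellB
          rw [PySem.Dict.contains_modify]
          simp [hne, hcd, hpge]
        rw [hcell]
      · rw [if_neg h2, List.getElem?_replicate, if_neg (by omega)]

-- one inner iteration: A's step on the built row is the build for B's label step
theorem pv_stepA_build (p_idx s_idx : PySem.Dict String Int)
    (hp : ∀ k ti, p_idx.get? k = some ti → 0 ≤ ti)
    (srow prow : List String) (d : PySem.Dict Int (List String)) (hd : pvGood d)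
    (fold : List (String × String)) :
    pvStepA p_idx s_idx srow (pvBuild prow d) fold
      = pvBuild prow (pvLabelStep p_idx s_idx srow d fold)
    ∧ pvGood (pvLabelStep p_idx s_idx srow d fold) := by
  unfold pvStepA pvLabelStep
  dsimp only
  by_cases hfrm : (pvFoldGet fold "from").getD "" = ""
  · rw [if_pos hfrm, if_pos hfrm]
    exact ⟨rfl, hd⟩
  · rw [if_neg hfrm, if_neg hfrm]
    cases hti? : p_idx.get? (pvNorm ((pvFoldGet fold "into").getD "Notes")) with
    | none => exact ⟨rfl, hd⟩
    | some ti =>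
      dsimp only
      by_cases hch : PySem.Str.strip
          (match s_idx.get? (pvNorm ((pvFoldGet fold "from").getD "")) with
            | some si => if si < (srow.length : Int) then PySem.List.pyGetD srow si "" else ""
            | none => "") = ""
      · rw [if_pos hch, if_pos hch]
        exact ⟨rfl, hd⟩
      · rw [if_neg hch, if_neg hch]
        have hti : 0 ≤ ti := hp _ _ hti?
        have hlab := pv_SN_label ((pvFoldGet fold "prefix").getD "") _ hch
        exact ⟨pv_set_build prow d hd ti hti _ hlab, pv_good_modify d hd ti hti _ hlab⟩

-- the whole inner loop
theorem pv_row_inv (p_idx s_idx : PySem.Dict String Int)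
    (hp : ∀ k ti, p_idx.get? k = some ti → 0 ≤ ti)
    (srow prow : List String) (folds : List (List (String × String))) :
    ∀ d, pvGood d →
      folds.foldl (pvStepA p_idx s_idx srow) (pvBuild prow d)
        = pvBuild prow (folds.foldl (pvLabelStep p_idx s_idx srow) d) := by
  induction folds with
  | nil => intro d _; rfl
  | cons f fs ih =>
      intro d hd
      obtain ⟨h1, h2⟩ := pv_stepA_build p_idx s_idx hp srow prow d hd f
      rw [List.foldl_cons, List.foldl_cons, h1]
      exact ih _ h2

theorem pv_row_eq (p_idx s_idx : PySem.Dict String Int)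
    (hp : ∀ k ti, p_idx.get? k = some ti → 0 ≤ ti)
    (srow prow : List String) (folds : List (List (String × String))) :
    folds.foldl (pvStepA p_idx s_idx srow) prow = pvRowB p_idx s_idx srow prow folds := by
  have h := pv_row_inv p_idx s_idx hp srow prow folds PySem.Dict.empty pv_good_empty
  rw [pvBuild_empty] at h
  exact h

-- p_idx maps headers to enumerate positions, which are ≥ 0
theorem pv_foldl_insert_nonneg (l : List (Int × String)) :
    ∀ (d : PySem.Dict String Int), (∀ k ti, d.get? k = some ti → 0 ≤ ti) →
    (∀ p ∈ l, 0 ≤ p.1) →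
    ∀ k ti, (l.foldl (fun d p => d.insert (pvNorm p.2) p.1) d).get? k = some ti → 0 ≤ ti := by
  induction l with
  | nil => intro d hd _ k ti h; exact hd k ti h
  | cons p rest ih =>
      intro d hd hl k ti h
      refine ih _ ?_ (fun q hq => hl q (by simp [hq])) k ti h
      intro k' ti' h'
      rw [PySem.Dict.get?_insert] at h'
      split_ifs at h' with he
      · cases h'; exact hl p (by simp)
      · exact hd k' ti' h'

theorem pvIdx_nonneg (header : List String) :
    ∀ k ti, (pvIdx header).get? k = some ti → 0 ≤ ti := by
  apply pv_foldl_insert_nonneg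
  · intro k ti h; rw [PySem.Dict.get?_empty] at h; cases h
  · intro p hp
    obtain ⟨k, hk, rfl⟩ := (PySem.List.mem_enumerate_iff header 0 p).mp hp
    simp

-- A's in-place update loop over range(1, n) is a map over the enumerated tail
theorem pv_loop_eq (g : Int → List String → List String) :
    ∀ (tl pre : List (List String)),
    (PySem.List.pyRange (pre.length) (pre.length + tl.length) 1).foldl
        (fun s i => s.set i.toNat (g i (PySem.List.pyGetD s i []))) (pre ++ tl)
      = pre ++ (PySem.List.enumerate tl (pre.length)).map (fun p => g p.1 p.2) := by
  intro tl
  induction tl with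
  | nil => intro pre; simp [PySem.List.enumerate_nil, PySem.List.pyRange]
  | cons r rest ih =>
      intro pre
      have hlt : (pre.length : Int) < pre.length + (r :: rest).length := by simp
      rw [PySem.List.pyRange_one_cons hlt, List.foldl_cons]
      have hget : PySem.List.pyGetD (pre ++ r :: rest) (pre.length : Int) [] = r := by
        rw [PySem.List.pyGetD_natCast]
        simp
      have hset : (pre ++ r :: rest).set (pre.length : Int).toNat (g (pre.length) r)
          = (pre ++ [g (pre.length) r]) ++ rest := by
        simp
      rw [hget, hset]
      have hrange : PySem.List.pyRange ((pre.length : Int) + 1) ((pre.length : Int) + (r :: rest).length) 1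
          = PySem.List.pyRange ((pre ++ [g (pre.length) r]).length) (((pre ++ [g (pre.length) r]).length : Int) + rest.length) 1 := by
        have h1 : ((pre ++ [g (pre.length) r]).length : Int) = (pre.length : Int) + 1 := by simp
        have h2 : ((pre ++ [g (pre.length) r]).length : Int) + rest.length = (pre.length : Int) + (r :: rest).length := by
          simp only [List.length_append, List.length_cons, List.length_nil]
          push_cast
          ring
        rw [← h2, ← h1]
      rw [hrange, ih (pre ++ [g (pre.length) r])]
      simp [PySem.List.enumerate_cons, List.append_assoc]

-- ===== VERDICT (by name: the statement is the Claim_ definition above) =====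
theorem apply_fold_into_notes_py_spec : Claim_equal_apply_fold_into_notes_py := by
  intro pr folds sr _
  unfold Spec_apply_fold_into_notes_py apply_fold_into_notes_py apply_fold_into_notes_py_alt
  by_cases h : folds = [] ∨ pr.length < 2
  · rw [if_pos h, if_pos h]
  · rw [if_neg h, if_neg h]
    dsimp only
    obtain ⟨hd, tl, rfl⟩ : ∃ hd tl, pr = hd :: tl := by
      cases pr with
      | nil => exact absurd (by simp : (([] : List (List String)).length < 2)) (by tauto)
      | cons hd tl => exact ⟨hd, tl, rfl⟩
    have key := pv_loop_eq (fun i prow =>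
        folds.foldl (pvStepA (pvIdx ((hd :: tl).headD []))
          (pvIdx (if sr ≠ [] then sr.headD [] else []))
          (if i < (sr.length : Int) then PySem.List.pyGetD sr i [] else [])) prow)
      tl [hd]
    simp only [List.singleton_append, List.length_cons, List.length_nil, List.headD_cons,
      List.tail_cons, Nat.zero_add, Nat.cast_add, Nat.cast_one] at key ⊢
    rw [show (1 : Int) + (tl.length : Int) = (tl.length : Int) + 1 from by ring] at key
    rw [key]
    congr 1
    apply List.map_congr_left
    intro p _
    exact pv_row_eq _ _ (pvIdx_nonneg hd) _ _ folds
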